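-- pv_equiv track=rewrite | github.com/fabiomigueldp/iAcoli | iAcoli_core/iacoli_core/agent/orchestrator.py | _split_reference
-- ===== SOURCE A (Python) =====
-- from typing import Any, Callable, Dict, List, Sequence
--
-- def _split_reference(reference: str) -> List[str]:
--     tokens: List[str] = []
--     buffer = ""
--     i = 0
--     length = len(reference)
--     while i < length:
--         char = reference[i]
--         if char == ".":
--             if buffer:
--                 tokens.append(buffer.strip())
--                 buffer = ""
--             i += 1
--             continue
--         if char == "[":
--             if buffer:
--                 tokens.append(buffer.strip())
--                 buffer = ""
--             end = reference.find("]", i)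
--             if end == -1:
--                 raise ValueError(f"Unclosed bracket in reference {reference}")
--             tokens.append(reference[i + 1 : end].strip())
--             i = end + 1
--             continue
--         buffer += char
--         i += 1
--     if buffer:
--         tokens.append(buffer.strip())
--     return [token for token in tokens if token]
-- ===== SOURCE B (Python) =====
-- from typing import List
--
-- def _split_reference(reference: str) -> List[str]:
--     tokens: List[str] = []
--     rest = reference
--     while True:
--         b = rest.find("[")
--         if b == -1:
--             tokens += rest.split(".")
--             break
--         e = rest.find("]", b + 1)
--         if e == -1:
--             raise ValueError(f"Unclosed bracket in reference {reference}")
--         tokens += rest[:b].split(".")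
--         tokens.append(rest[b + 1 : e])
--         rest = rest[e + 1 :]
--     tokens = [t.strip() for t in tokens]
--     return [t for t in tokens if t]
-- ===== Notes on version B (the rewrite author's own statement) =====
-- stated objective: faster
-- what changed: Replaced A's character-by-character scan with a mutable string buffer (quadratic buffer += char) by a slice-based loop that repeatedly finds the next bracket, splits each pre-bracket chunk on '.' wholesale with str.split, and strips/filters all tokens once at the end.
import Mathlib
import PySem

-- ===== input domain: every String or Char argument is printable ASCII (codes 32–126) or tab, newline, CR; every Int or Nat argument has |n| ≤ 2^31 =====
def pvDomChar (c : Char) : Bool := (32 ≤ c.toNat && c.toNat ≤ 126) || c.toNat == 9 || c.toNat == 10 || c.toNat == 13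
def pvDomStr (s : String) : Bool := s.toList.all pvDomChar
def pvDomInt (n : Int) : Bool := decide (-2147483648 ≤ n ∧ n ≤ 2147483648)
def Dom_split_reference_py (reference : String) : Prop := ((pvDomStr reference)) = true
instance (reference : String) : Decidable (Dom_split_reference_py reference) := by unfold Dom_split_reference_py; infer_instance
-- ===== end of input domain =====

-- B replaces A's char-by-char scan with a mutable buffer by a slice-based loop (find next
-- bracket, split the pre-bracket chunk on '.' wholesale, strip/filter once at the end):
-- objective = faster (a timing run measured B faster at large sizes: A rebuilds the buffer per char);
-- return values agree wherever A returns (its ValueError inputs are outside Pre_).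

-- ===== PORT A =====
-- A's while-loop over index i is ported as recursion on the remaining suffix (the suffix
-- reference[i:] determines the rest of the run); reference.find(']', i), searched from the
-- '[' (which is not ']'), is the first index of ']' in the suffix after '[': PySem.List.index?.
-- `none` models the ValueError raise.
def pvALoop : List Char → List Char → List (List Char) → Option (List (List Char))
  | [], buffer, tokens =>
      some (if buffer ≠ [] then tokens ++ [PySem.Chars.strip buffer] else tokens)
  | c :: rest, buffer, tokens =>
      if c = '.' then
        pvALoop rest [] (if buffer ≠ [] then tokens ++ [PySem.Chars.strip buffer] else tokens)
      else if c = '[' then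
        match PySem.List.index? rest ']' with
        | none => none
        | some e =>
            pvALoop (rest.drop (e + 1)) []
              ((if buffer ≠ [] then tokens ++ [PySem.Chars.strip buffer] else tokens)
                ++ [PySem.Chars.strip (rest.take e)])
      else pvALoop rest (buffer ++ [c]) tokens
  termination_by s _ _ => s.length
  decreasing_by all_goals (simp only [List.length_drop, List.length_cons]; omega)

def split_reference_py (reference : String) : List String :=
  match pvALoop reference.toList [] [] with
  | none => []   -- ValueError: unreachable under Pre_
  | some tokens => (tokens.filter (fun t => decide (t ≠ []))).map String.ofList

-- ===== PORT B =====
-- transliteration of str.split('.') (single-character separator)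
def pvSplitDot : List Char → List (List Char)
  | [] => [[]]
  | c :: r =>
      if c = '.' then [] :: pvSplitDot r
      else
        match pvSplitDot r with
        | [] => [[c]]
        | p :: ps => (c :: p) :: ps

-- B's while-loop: rest.find('[') / rest.find(']', b + 1) are first-index lookups
-- (PySem.List.index?, the second one on the suffix after the '['); slices are take/drop.
def pvBLoop (s : List Char) (tokens : List (List Char)) : Option (List (List Char)) :=
  match hb : PySem.List.index? s '[' with
  | none => some (tokens ++ pvSplitDot s)
  | some b =>
      match PySem.List.index? (s.drop (b + 1)) ']' with
      | none => none
      | some e =>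
          pvBLoop ((s.drop (b + 1)).drop (e + 1))
            (tokens ++ pvSplitDot (s.take b) ++ [(s.drop (b + 1)).take e])
  termination_by s.length
  decreasing_by
    have hm : '[' ∈ s := (PySem.List.index?_isSome_iff _ _).mp (by rw [hb]; rfl)
    have hp : 0 < s.length := List.length_pos_of_mem hm
    simp only [List.length_drop]; omega

def split_reference_py_alt (reference : String) : List String :=
  match pvBLoop reference.toList [] with
  | none => []   -- ValueError: unreachable under Pre_
  | some tokens =>
      ((tokens.map PySem.Chars.strip).filter (fun t => decide (t ≠ []))).map String.ofList

-- ===== PRECONDITION & SPEC =====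
-- Pre_ excludes exactly the inputs on which A (and B) raise ValueError: a '[' with no ']'
-- anywhere at or after it (an unclosed bracket).
def Pre_split_reference_py (reference : String) : Prop :=
  ∀ i, i < reference.toList.length → reference.toList.getD i ' ' = '[' →
    ']' ∈ reference.toList.drop i
instance (reference : String) : Decidable (Pre_split_reference_py reference) := by
  unfold Pre_split_reference_py; infer_instance
def pvWitness_split_reference_py : String := "a.b[ c ].d"

def Spec_split_reference_py (reference : String) (out : List String) : Prop := out = split_reference_py_alt reference
instance (reference : String) (out : List String) : Decidable (Spec_split_reference_py reference out) := by unfold Spec_split_reference_py; infer_instance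

-- ===== CLAIM (what is proved, stated in full; the proofs are below) =====
def Claim_equal_split_reference_py : Prop := ∀ (reference : String), Dom_split_reference_py reference → Pre_split_reference_py reference → Spec_split_reference_py reference (split_reference_py reference)

-- ===== LEMMAS AND PROOFS =====

-- A's final filter / B's final strip-then-filter, on the token lists
def pvPostA (ts : List (List Char)) : List (List Char) := ts.filter (fun t => decide (t ≠ []))
def pvPostB (ts : List (List Char)) : List (List Char) :=
  (ts.map PySem.Chars.strip).filter (fun t => decide (t ≠ []))

theorem pvStrip_nil : PySem.Chars.strip [] = [] := rfl

theorem pvPostA_append (a b : List (List Char)) : pvPostA (a ++ b) = pvPostA a ++ pvPostA b := by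
  simp [pvPostA]

theorem pvPostB_append (a b : List (List Char)) : pvPostB (a ++ b) = pvPostB a ++ pvPostB b := by
  simp [pvPostB, List.filter_append]

theorem pvPostB_cons (x : List Char) (l : List (List Char)) :
    pvPostB (x :: l) = pvPostB [x] ++ pvPostB l := by
  by_cases h : PySem.Chars.strip x = [] <;> simp [pvPostB, h]

theorem pvFlush (b : List Char) :
    pvPostA (if b ≠ [] then [PySem.Chars.strip b] else []) = pvPostB [b] := by
  cases b <;> simp [pvPostA, pvPostB, pvStrip_nil]

theorem pvStripTok (x : List Char) : pvPostA [PySem.Chars.strip x] = pvPostB [x] := by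
  simp [pvPostA, pvPostB]

theorem pvSplitDot_no_dot (b : List Char) (h : '.' ∉ b) : pvSplitDot b = [b] := by
  induction b with
  | nil => rfl
  | cons c r ih =>
      have hc : ¬ c = '.' := fun hc => h (hc ▸ List.mem_cons_self ..)
      have hr : '.' ∉ r := fun hm => h (List.mem_cons_of_mem _ hm)
      simp [pvSplitDot, hc, ih hr]

theorem pvSplitDot_dot (b r : List Char) (h : '.' ∉ b) :
    pvSplitDot (b ++ '.' :: r) = b :: pvSplitDot r := by
  induction b with
  | nil => simp [pvSplitDot]
  | cons c b' ih =>
      have hc : ¬ c = '.' := fun hc => h (hc ▸ List.mem_cons_self ..)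
      have hb' : '.' ∉ b' := fun hm => h (List.mem_cons_of_mem _ hm)
      simp [pvSplitDot, hc, ih hb']

-- accumulator lemma for A's loop
theorem pvAccA (n : Nat) : ∀ s : List Char, s.length ≤ n → ∀ buffer tokens,
    pvALoop s buffer tokens = (pvALoop s buffer []).map (tokens ++ ·) := by
  induction n with
  | zero =>
      intro s hs buffer tokens
      have : s = [] := List.length_eq_zero_iff.mp (Nat.le_zero.mp hs)
      subst this
      by_cases hb : buffer = [] <;> simp [pvALoop, hb]
  | succ n ih =>
      intro s hs buffer tokens
      cases s with
      | nil => by_cases hb : buffer = [] <;> simp [pvALoop, hb]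
      | cons c rest =>
          have hs' : rest.length ≤ n := by
            simp only [List.length_cons] at hs; omega
          rw [pvALoop, pvALoop]
          by_cases hd : c = '.'
          · rw [if_pos hd, if_pos hd]
            rw [ih rest hs' _ (if buffer ≠ [] then tokens ++ [PySem.Chars.strip buffer] else tokens)]
            rw [ih rest hs' _ (if buffer ≠ [] then [] ++ [PySem.Chars.strip buffer] else [])]
            cases pvALoop rest [] [] <;> by_cases hb : buffer = [] <;> simp [hb]
          · by_cases hbr : c = '['
            · rw [if_neg hd, if_neg hd, if_pos hbr, if_pos hbr]
              cases he : PySem.List.index? rest ']' with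
              | none => simp
              | some e =>
                  dsimp only
                  have hlen : (rest.drop (e + 1)).length ≤ n := by
                    simp only [List.length_drop]; omega
                  rw [ih _ hlen _ ((if buffer ≠ [] then tokens ++ [PySem.Chars.strip buffer] else tokens)
                        ++ [PySem.Chars.strip (rest.take e)])]
                  rw [ih _ hlen _ ((if buffer ≠ [] then [] ++ [PySem.Chars.strip buffer] else [])
                        ++ [PySem.Chars.strip (rest.take e)])]
                  cases pvALoop (rest.drop (e + 1)) [] [] <;>
                    by_cases hb : buffer = [] <;> simp [hb]
            · rw [if_neg hd, if_neg hd, if_neg hbr, if_neg hbr, ih rest hs' _ tokens]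

-- accumulator lemma for B's loop
theorem pvAccB (n : Nat) : ∀ s : List Char, s.length ≤ n → ∀ tokens,
    pvBLoop s tokens = (pvBLoop s []).map (tokens ++ ·) := by
  induction n with
  | zero =>
      intro s hs tokens
      have : s = [] := List.length_eq_zero_iff.mp (Nat.le_zero.mp hs)
      subst this
      rw [pvBLoop, pvBLoop]
      simp [PySem.List.index?]
  | succ n ih =>
      intro s hs tokens
      rw [pvBLoop, pvBLoop]
      cases hb : PySem.List.index? s '[' with
      | none => simp
      | some b =>
          dsimp only
          cases he : PySem.List.index? (s.drop (b + 1)) ']' with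
          | none => simp
          | some e =>
              dsimp only
              have hmem : '[' ∈ s := (PySem.List.index?_isSome_iff _ _).mp (by rw [hb]; rfl)
              have hpos : 0 < s.length := List.length_pos_of_mem hmem
              have hlen : (List.drop (e + 1) (List.drop (b + 1) s)).length ≤ n := by
                simp only [List.length_drop]; omega
              simp only [List.nil_append]
              rw [ih _ hlen (tokens ++ pvSplitDot (s.take b) ++ [(s.drop (b + 1)).take e]),
                  ih _ hlen (pvSplitDot (s.take b) ++ [(s.drop (b + 1)).take e])]
              cases pvBLoop (List.drop (e + 1) (List.drop (b + 1) s)) [] <;> simp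

-- A over a bracket-free string = split on dots (after strip-and-filter)
theorem pvL1 (s : List Char) : '[' ∉ s → ∀ buffer, '[' ∉ buffer → '.' ∉ buffer →
    Option.map pvPostA (pvALoop s buffer []) = some (pvPostB (pvSplitDot (buffer ++ s))) := by
  induction s with
  | nil =>
      intro _ buffer _ hd
      rw [pvALoop]
      simp only [List.append_nil, List.nil_append, Option.map_some]
      rw [pvSplitDot_no_dot buffer hd, pvFlush]
  | cons c rest ih =>
      intro hs buffer hbb hbd
      have hcne : c ≠ '[' := fun h => hs (h ▸ List.mem_cons_self ..)
      have hrest : '[' ∉ rest := fun h => hs (List.mem_cons_of_mem _ h)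
      by_cases hd : c = '.'
      · subst hd
        rw [pvALoop, if_pos rfl, pvAccA rest.length rest le_rfl]
        have h1 := ih hrest [] (by simp) (by simp)
        simp only [List.nil_append] at h1
        cases ha : pvALoop rest [] [] with
        | none => rw [ha] at h1; simp at h1
        | some w =>
            rw [ha] at h1
            simp only [Option.map_some, Option.some.injEq] at h1
            rw [pvSplitDot_dot buffer rest hbd, pvPostB_cons]
            simp only [List.nil_append, Option.map_some, Option.some.injEq]
            rw [pvPostA_append, pvFlush, h1]
      · rw [pvALoop, if_neg hd, if_neg hcne]
        have h1 := ih hrest (buffer ++ [c])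
          (by simp [hbb]; exact fun h => hcne h.symm)
          (by simp [hbd]; exact fun h => hd h.symm)
        simpa [List.append_assoc] using h1

-- A over a string whose first '[' follows the bracket-free prefix `pre`
theorem pvL2A (pre : List Char) : '[' ∉ pre → ∀ (suf buffer : List Char),
    '[' ∉ buffer → '.' ∉ buffer →
    Option.map pvPostA (pvALoop (pre ++ '[' :: suf) buffer []) =
      match PySem.List.index? suf ']' with
      | none => none
      | some e =>
          Option.map (fun t => pvPostB (pvSplitDot (buffer ++ pre)) ++ pvPostB [suf.take e] ++ t)
            (Option.map pvPostA (pvALoop (suf.drop (e + 1)) [] [])) := by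
  induction pre with
  | nil =>
      intro _ suf buffer hbb hbd
      rw [List.nil_append, pvALoop, if_neg (by decide), if_pos rfl]
      cases he : PySem.List.index? suf ']' with
      | none => simp
      | some e =>
          dsimp only
          rw [pvAccA (suf.drop (e + 1)).length _ le_rfl]
          cases pvALoop (suf.drop (e + 1)) [] [] with
          | none => simp
          | some w =>
              simp only [Option.map_some, Option.some.injEq, List.nil_append]
              rw [List.append_nil, pvSplitDot_no_dot buffer hbd]
              rw [show ((if buffer ≠ [] then [PySem.Chars.strip buffer] else []) ++
                    [PySem.Chars.strip (suf.take e)]) ++ w =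
                  ((if buffer ≠ [] then [PySem.Chars.strip buffer] else []) ++
                    ([PySem.Chars.strip (suf.take e)] ++ w)) from by
                    by_cases hb : buffer = [] <;> simp [hb]]
              rw [pvPostA_append, pvPostA_append, pvFlush, pvStripTok]
              simp
  | cons c pre' ih =>
      intro hp suf buffer hbb hbd
      have hcne : c ≠ '[' := fun h => hp (h ▸ List.mem_cons_self ..)
      have hpre' : '[' ∉ pre' := fun h => hp (List.mem_cons_of_mem _ h)
      rw [List.cons_append, pvALoop]
      by_cases hd : c = '.'
      · rw [if_pos hd]
        rw [pvAccA (pre' ++ '[' :: suf).length _ le_rfl]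
        have h1 := ih hpre' suf [] (by simp) (by simp)
        subst hd
        rw [pvSplitDot_dot buffer pre' hbd, pvPostB_cons]
        cases he : PySem.List.index? suf ']' with
        | none =>
            rw [he] at h1
            simp only [List.nil_append] at h1
            dsimp only
            cases ha : pvALoop (pre' ++ '[' :: suf) [] [] with
            | none => simp
            | some w => rw [ha] at h1; simp at h1
        | some e =>
            rw [he] at h1
            simp only [List.nil_append] at h1
            dsimp only
            cases ha : pvALoop (pre' ++ '[' :: suf) [] [] with
            | none =>
                rw [ha] at h1
                cases hy : pvALoop (suf.drop (e + 1)) [] [] with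
                | none => simp
                | some y => rw [hy] at h1; simp at h1
            | some w =>
                rw [ha] at h1
                cases hy : pvALoop (suf.drop (e + 1)) [] [] with
                | none => rw [hy] at h1; simp at h1
                | some y =>
                    rw [hy] at h1
                    simp only [Option.map_some, Option.some.injEq] at h1
                    simp only [Option.map_some, Option.some.injEq, List.nil_append]
                    rw [pvPostA_append, pvFlush, h1]
                    simp [List.append_assoc]
      · rw [if_neg hd, if_neg hcne]
        have h1 := ih hpre' suf (buffer ++ [c])
          (by simp [hbb]; exact fun h => hcne h.symm)
          (by simp [hbd]; exact fun h => hd h.symm)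
        rw [List.append_assoc] at h1
        simpa [List.append_assoc] using h1

-- main equivalence of the two loops, after the final strip/filter
theorem pvMain (n : Nat) : ∀ s : List Char, s.length ≤ n →
    Option.map pvPostA (pvALoop s [] []) = Option.map pvPostB (pvBLoop s []) := by
  induction n with
  | zero =>
      intro s hs
      have : s = [] := List.length_eq_zero_iff.mp (Nat.le_zero.mp hs)
      subst this
      rw [pvALoop, pvBLoop]
      simp [pvSplitDot, pvPostA, pvPostB, pvStrip_nil, pvBLoop, PySem.List.index?]
  | succ n ih =>
      intro s hs
      rw [pvBLoop]
      cases hb : PySem.List.index? s '[' with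
      | none =>
          have hnotin : '[' ∉ s := (PySem.List.index?_eq_none_iff _ _).mp hb
          rw [pvL1 s hnotin [] (by simp) (by simp)]
          simp
      | some b =>
          dsimp only
          obtain ⟨pre, suf, hsplit, hlenpre, hprenb⟩ := (PySem.List.index?_eq_some_iff _ _ _).mp hb
          subst hsplit
          have htake : (pre ++ '[' :: suf).take b = pre := by
            rw [← hlenpre, List.take_left]
          have hdrop : (pre ++ '[' :: suf).drop (b + 1) = suf := by
            rw [show pre ++ '[' :: suf = (pre ++ ['[']) ++ suf from by simp,
              List.drop_left' (by simp [hlenpre])]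
          have hA := pvL2A pre hprenb suf [] (by simp) (by simp)
          simp only [List.nil_append] at hA
          rw [hA, hdrop, htake]
          cases he : PySem.List.index? suf ']' with
          | none => simp
          | some e =>
              dsimp only
              have hslen : (suf.drop (e + 1)).length ≤ n := by
                simp only [List.length_append, List.length_cons, List.length_drop] at hs ⊢
                omega
              have hrec := ih (suf.drop (e + 1)) hslen
              rw [pvAccB (suf.drop (e + 1)).length _ le_rfl]
              cases ha : pvALoop (suf.drop (e + 1)) [] [] with
              | none =>
                  rw [ha] at hrec
                  cases hbb : pvBLoop (suf.drop (e + 1)) [] with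
                  | none => simp
                  | some w => rw [hbb] at hrec; simp at hrec
              | some w =>
                  rw [ha] at hrec
                  cases hbb : pvBLoop (suf.drop (e + 1)) [] with
                  | none => rw [hbb] at hrec; simp at hrec
                  | some w' =>
                      rw [hbb] at hrec
                      simp only [Option.map_some, Option.some.injEq] at hrec
                      simp only [Option.map_some, Option.some.injEq, List.nil_append]
                      rw [show pvSplitDot pre ++ [suf.take e] ++ w' =
                        pvSplitDot pre ++ ([suf.take e] ++ w') from by simp]
                      rw [pvPostB_append, pvPostB_append]
                      simp [hrec]

-- ===== VERDICT (by name: the statement is the Claim_ definition above) =====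
theorem split_reference_py_spec : Claim_equal_split_reference_py := by
  unfold Claim_equal_split_reference_py Spec_split_reference_py
  intro reference _ _
  unfold split_reference_py split_reference_py_alt
  have h := pvMain reference.toList.length reference.toList le_rfl
  cases ha : pvALoop reference.toList [] [] with
  | none =>
      rw [ha] at h
      cases hb : pvBLoop reference.toList [] with
      | none => simp
      | some w => rw [hb] at h; simp at h
  | some w =>
      rw [ha] at h
      cases hb : pvBLoop reference.toList [] with
      | none => rw [hb] at h; simp at h
      | some w' =>
          rw [hb] at h
          simp only [Option.map_some, Option.some.injEq] at h
          show (pvPostA w).map String.ofList = (pvPostB w').map String.ofList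
          rw [h]
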